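-- pv_equiv track=rewrite | github.com/Dafydd8/TDV | Guias/Guia 2/ej7.py | sumasDistintas
-- ===== SOURCE A (Python) =====
-- def sumasDistintas(n):
--     if n == 1:
--         return 1
--     elif n == 2:
--         return 1# hay una forma de escribir 2: (1+1)
--     elif n == 3:
--         return 2 # hay dos formas de escribir 3: (1+1+1),(3)
--     elif n == 4:
--         return 4# hay cuatro formas de escribir 4: (1+1+1+1),(1+3)(3+1),(4)
--     else:
--         return sumasDistintas(n-1) + sumasDistintas(n-3) + sumasDistintas(n-4)
-- ===== SOURCE B (Python) =====
-- def sumasDistintas(n):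
--     a, b, c, d = 1, 1, 2, 4  # s(1), s(2), s(3), s(4)
--     if n == 1:
--         return a
--     if n == 2:
--         return b
--     if n == 3:
--         return c
--     for _ in range(n - 4):
--         a, b, c, d = b, c, d, d + b + a
--     return d
-- ===== Notes on version B (the rewrite author's own statement) =====
-- stated objective: faster
-- what changed: Replaced the exponential triple recursion with a bottom-up iterative recurrence keeping a 4-value sliding window; intended as faster (asymptotic: linear vs exponential recursion), but a timing run could not confirm a ratio because A timed out on most larger inputs where B returned.
import Mathlib
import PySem

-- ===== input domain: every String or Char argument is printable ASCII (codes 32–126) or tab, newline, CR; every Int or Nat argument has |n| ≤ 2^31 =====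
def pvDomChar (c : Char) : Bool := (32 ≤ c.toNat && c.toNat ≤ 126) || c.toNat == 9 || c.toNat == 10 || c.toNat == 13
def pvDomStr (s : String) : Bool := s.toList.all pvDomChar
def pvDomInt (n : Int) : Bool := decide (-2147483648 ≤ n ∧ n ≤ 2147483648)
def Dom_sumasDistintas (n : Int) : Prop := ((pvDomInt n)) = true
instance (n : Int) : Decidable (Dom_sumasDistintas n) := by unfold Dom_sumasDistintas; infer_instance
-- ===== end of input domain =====

-- B replaces A's triple recursion by a bottom-up sliding-window iteration; intended as faster, but a timing run could not confirm a ratio (A timed out on most larger inputs where B returned).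
-- A's side effects: none. Pre_ excludes n ≤ 0, where A recurses forever (RecursionError).

-- ===== PORT A =====
-- A's recursion, on n.toNat (Pre_ restricts to n ≥ 1, where toNat is faithful)
def sumasDistintasGo : Nat → Int
  | 0 => 0
  | 1 => 1
  | 2 => 1
  | 3 => 2
  | 4 => 4
  | (k+5) => sumasDistintasGo (k+4) + sumasDistintasGo (k+2) + sumasDistintasGo (k+1)

def sumasDistintas (n : Int) : Int := sumasDistintasGo n.toNat

-- ===== PORT B =====
def sumasDistintasStep (s : Int × Int × Int × Int) : Int × Int × Int × Int :=
  (s.2.1, s.2.2.1, s.2.2.2, s.2.2.2 + s.2.1 + s.1)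

def sumasDistintas_alt (n : Int) : Int :=
  if n == 1 then 1
  else if n == 2 then 1
  else if n == 3 then 2
  else
    ((PySem.List.pyRange 0 (n - 4) 1).foldl
      (fun s _ => sumasDistintasStep s) ((1 : Int), (1 : Int), (2 : Int), (4 : Int))).2.2.2

-- ===== PRECONDITION & SPEC =====
-- Pre_ excludes n ≤ 0, on which the Python A recurses without a base case and raises RecursionError.
def Pre_sumasDistintas (n : Int) : Prop := 1 ≤ n
instance (n : Int) : Decidable (Pre_sumasDistintas n) := by unfold Pre_sumasDistintas; infer_instance
def pvWitness_sumasDistintas : Int := 7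

def Spec_sumasDistintas (n : Int) (out : Int) : Prop := out = sumasDistintas_alt n
instance (n : Int) (out : Int) : Decidable (Spec_sumasDistintas n out) := by unfold Spec_sumasDistintas; infer_instance

-- ===== CLAIM (what is proved, stated in full; the proofs are below) =====
def Claim_equal_sumasDistintas : Prop := ∀ (n : Int), Dom_sumasDistintas n → Pre_sumasDistintas n → Spec_sumasDistintas n (sumasDistintas n)

-- ===== LEMMAS AND PROOFS =====
theorem foldl_ignore {α β : Type} (g : α → α) (s : α) (l : List β) :
    l.foldl (fun s _ => g s) s = g^[l.length] s := by
  induction l generalizing s with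
  | nil => rfl
  | cons x xs ih => simp [List.foldl, ih, Function.iterate_succ_apply]

theorem iterate_step (k m : Nat) :
    sumasDistintasStep^[k] (sumasDistintasGo (m+1), sumasDistintasGo (m+2),
        sumasDistintasGo (m+3), sumasDistintasGo (m+4)) =
      (sumasDistintasGo (m+1+k), sumasDistintasGo (m+2+k),
        sumasDistintasGo (m+3+k), sumasDistintasGo (m+4+k)) := by
  induction k generalizing m with
  | zero => rfl
  | succ k ih =>
      rw [Function.iterate_succ_apply]
      have hstep : sumasDistintasStep (sumasDistintasGo (m+1), sumasDistintasGo (m+2),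
          sumasDistintasGo (m+3), sumasDistintasGo (m+4)) =
          (sumasDistintasGo (m+2), sumasDistintasGo (m+3),
            sumasDistintasGo (m+4), sumasDistintasGo (m+5)) := by
        simp [sumasDistintasStep, sumasDistintasGo]
      rw [hstep]
      have e1 : m+1+(k+1) = (m+1)+1+k := by omega
      have e2 : m+2+(k+1) = (m+1)+2+k := by omega
      have e3 : m+3+(k+1) = (m+1)+3+k := by omega
      have e4 : m+4+(k+1) = (m+1)+4+k := by omega
      rw [e1, e2, e3, e4]
      exact ih (m+1)

theorem go_eq_alt (n : Int) (h : 1 ≤ n) : sumasDistintasGo n.toNat = sumasDistintas_alt n := by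
  unfold sumasDistintas_alt
  by_cases h1 : n = 1
  · subst h1; simp [sumasDistintasGo]
  · by_cases h2 : n = 2
    · subst h2; simp [sumasDistintasGo]
    · by_cases h3 : n = 3
      · subst h3; simp [sumasDistintasGo]
      · have h4 : 4 ≤ n := by omega
        simp only [beq_iff_eq, h1, h2, h3, if_false]
        rw [foldl_ignore, PySem.List.length_pyRange_one]
        have hsub : ((1:Int), (1:Int), (2:Int), (4:Int)) =
            (sumasDistintasGo (0+1), sumasDistintasGo (0+2),
              sumasDistintasGo (0+3), sumasDistintasGo (0+4)) := by rfl
        rw [hsub, iterate_step]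
        have : 0 + 4 + (n - 4 - 0).toNat = n.toNat := by omega
        rw [this]

-- ===== VERDICT (by name: the statement is the Claim_ definition above) =====
theorem sumasDistintas_spec : Claim_equal_sumasDistintas := by
  intro n _ hpre
  unfold Spec_sumasDistintas sumasDistintas
  exact go_eq_alt n hpre
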